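-- pv_equiv track=rewrite | github.com/mbaljko/vault-grading-pipeline | 01_units/pipelines/pl1C_rubric_devt/python/generate-scoring-report_non_Layer0_consuming.py | build_coincidence_count_matrix
-- ===== SOURCE A (Python) =====
-- def build_coincidence_count_matrix(
-- 	template_ids: list[str],
-- 	positive_observation_keys_by_template: dict[str, list[tuple[str, str]]],
-- 	positive_presence_keys_by_template: dict[str, set[tuple[str, str]]],
-- ) -> dict[str, dict[str, int]]:
-- 	count_matrix: dict[str, dict[str, int]] = {}
-- 	for row_template_id in template_ids:
-- 		count_matrix[row_template_id] = {}
-- 		row_observation_keys = positive_observation_keys_by_template.get(row_template_id, [])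
-- 		for column_template_id in template_ids:
-- 			column_presence_keys = positive_presence_keys_by_template.get(column_template_id, set())
-- 			count_matrix[row_template_id][column_template_id] = sum(
-- 				1 for observation_key in row_observation_keys if observation_key in column_presence_keys
-- 			)
-- 	return count_matrix
-- ===== SOURCE B (Python) =====
-- def build_coincidence_count_matrix(
-- 	template_ids: list[str],
-- 	positive_observation_keys_by_template: dict[str, list[tuple[str, str]]],
-- 	positive_presence_keys_by_template: dict[str, set[tuple[str, str]]],
-- ) -> dict[str, dict[str, int]]:
-- 	# Inverted index: observation key -> the template columns whose presence set contains it.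
-- 	columns = list(dict.fromkeys(template_ids))
-- 	index: dict[tuple[str, str], list[str]] = {}
-- 	for column_template_id in columns:
-- 		for key in set(positive_presence_keys_by_template.get(column_template_id, set())):
-- 			index.setdefault(key, []).append(column_template_id)
-- 	matrix: dict[str, dict[str, int]] = {}
-- 	for row_template_id in columns:
-- 		counts = {column_template_id: 0 for column_template_id in columns}
-- 		for key in positive_observation_keys_by_template.get(row_template_id, []):
-- 			for column_template_id in index.get(key, []):
-- 				counts[column_template_id] += 1
-- 		matrix[row_template_id] = counts
-- 	return matrix
-- ===== Notes on version B (the rewrite author's own statement) =====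
-- stated objective: faster
-- what changed: Replaces A's per-cell scan (for every row-column pair, testing every observation key against the column's presence set) with an inverted index from observation key to the columns whose presence set holds it, so counts are accumulated once per actual key occurrence.
import Mathlib
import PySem

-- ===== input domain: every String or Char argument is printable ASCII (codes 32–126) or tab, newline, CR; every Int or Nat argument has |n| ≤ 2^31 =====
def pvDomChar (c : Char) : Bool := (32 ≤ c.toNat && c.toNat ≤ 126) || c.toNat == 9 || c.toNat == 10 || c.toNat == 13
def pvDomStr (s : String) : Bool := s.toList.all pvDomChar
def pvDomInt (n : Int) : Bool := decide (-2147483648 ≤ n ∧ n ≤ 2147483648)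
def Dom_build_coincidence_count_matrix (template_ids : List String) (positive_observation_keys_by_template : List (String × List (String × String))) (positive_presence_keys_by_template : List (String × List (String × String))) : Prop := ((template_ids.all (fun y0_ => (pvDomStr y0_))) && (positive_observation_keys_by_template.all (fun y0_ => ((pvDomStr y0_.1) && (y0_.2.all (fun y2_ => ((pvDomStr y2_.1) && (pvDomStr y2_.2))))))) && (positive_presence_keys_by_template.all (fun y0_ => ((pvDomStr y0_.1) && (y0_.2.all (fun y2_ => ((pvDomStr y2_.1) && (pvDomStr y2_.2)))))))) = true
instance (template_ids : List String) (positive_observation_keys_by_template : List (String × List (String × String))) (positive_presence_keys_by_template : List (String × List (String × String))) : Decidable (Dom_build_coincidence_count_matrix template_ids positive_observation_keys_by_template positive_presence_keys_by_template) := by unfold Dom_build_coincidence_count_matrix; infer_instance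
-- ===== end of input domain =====

-- B replaces A's per-cell scan of all observation keys against every presence set by an inverted
-- index (observation key -> columns whose presence set holds it) and per-row counter increments.

-- ===== PORT A =====
def build_coincidence_count_matrix (template_ids : List String) (positive_observation_keys_by_template : List (String × List (String × String))) (positive_presence_keys_by_template : List (String × List (String × String))) : List (String × List (String × Int)) :=
  let count_matrix : PySem.Dict String (PySem.Dict String Int) :=
    template_ids.foldl (fun count_matrix row_template_id =>
      let count_matrix := count_matrix.insert row_template_id PySem.Dict.empty
      let row_observation_keys := (PySem.Dict.mk positive_observation_keys_by_template).getD row_template_id []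
      template_ids.foldl (fun count_matrix column_template_id =>
        let column_presence_keys := (PySem.Dict.mk positive_presence_keys_by_template).getD column_template_id []
        count_matrix.modify row_template_id PySem.Dict.empty (fun inner =>
          inner.insert column_template_id
            ((row_observation_keys.map (fun observation_key =>
                if PySem.Set.contains column_presence_keys observation_key then (1 : Int) else 0)).sum)))
        count_matrix)
      PySem.Dict.empty
  count_matrix.items.map (fun p => (p.1, p.2.items))

-- ===== PORT B =====
def build_coincidence_count_matrix_alt (template_ids : List String) (positive_observation_keys_by_template : List (String × List (String × String))) (positive_presence_keys_by_template : List (String × List (String × String))) : List (String × List (String × Int)) :=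
  let columns := PySem.List.dedup template_ids
  let index : PySem.Dict (String × String) (List String) :=
    columns.foldl (fun index column_template_id =>
      (PySem.Set.ofList ((PySem.Dict.mk positive_presence_keys_by_template).getD column_template_id [])).foldl
        (fun index key => index.modify key [] (· ++ [column_template_id])) index)
      PySem.Dict.empty
  let matrix : PySem.Dict String (PySem.Dict String Int) :=
    columns.foldl (fun matrix row_template_id =>
      let counts := columns.foldl (fun counts column_template_id => counts.insert column_template_id (0 : Int)) PySem.Dict.empty
      let counts := ((PySem.Dict.mk positive_observation_keys_by_template).getD row_template_id []).foldl
        (fun counts key => (index.getD key []).foldl (fun counts column_template_id => counts.modify column_template_id 0 (· + 1)) counts)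
        counts
      matrix.insert row_template_id counts) PySem.Dict.empty
  matrix.items.map (fun p => (p.1, p.2.items))

-- ===== PRECONDITION & SPEC =====
def Spec_build_coincidence_count_matrix (template_ids : List String) (positive_observation_keys_by_template : List (String × List (String × String))) (positive_presence_keys_by_template : List (String × List (String × String))) (out : List (String × List (String × Int))) : Prop := out = build_coincidence_count_matrix_alt template_ids positive_observation_keys_by_template positive_presence_keys_by_template
instance (template_ids : List String) (positive_observation_keys_by_template : List (String × List (String × String))) (positive_presence_keys_by_template : List (String × List (String × String))) (out : List (String × List (String × Int))) : Decidable (Spec_build_coincidence_count_matrix template_ids positive_observation_keys_by_template positive_presence_keys_by_template out) := by unfold Spec_build_coincidence_count_matrix; infer_instance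

-- ===== CLAIM (what is proved, stated in full; the proofs are below) =====
def Claim_equal_build_coincidence_count_matrix : Prop := ∀ (template_ids : List String) (positive_observation_keys_by_template : List (String × List (String × String))) (positive_presence_keys_by_template : List (String × List (String × String))), Dom_build_coincidence_count_matrix template_ids positive_observation_keys_by_template positive_presence_keys_by_template → Spec_build_coincidence_count_matrix template_ids positive_observation_keys_by_template positive_presence_keys_by_template (build_coincidence_count_matrix template_ids positive_observation_keys_by_template positive_presence_keys_by_template)

-- ===== LEMMAS AND PROOFS =====

-- proof-side abbreviations for A's cell value and row dict, and B's inverted-index contents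
def pvCellA (obs pres : List (String × List (String × String))) (r c : String) : Int :=
  (((PySem.Dict.mk obs).getD r []).map (fun observation_key =>
     if PySem.Set.contains ((PySem.Dict.mk pres).getD c []) observation_key then (1 : Int) else 0)).sum

def pvRowA (tids0 : List String) (obs pres : List (String × List (String × String))) (r : String) : PySem.Dict String Int :=
  tids0.foldl (fun inner col => inner.insert col (pvCellA obs pres r col)) PySem.Dict.empty

def pvPairs (pres : List (String × List (String × String))) (cols : List String) : List ((String × String) × String) :=
  cols.flatMap (fun col => (PySem.Set.ofList ((PySem.Dict.mk pres).getD col [])).map (fun k => (k, col)))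

def pvIdxD (pres : List (String × List (String × String))) (cols : List String) (key : String × String) : List String :=
  ((pvPairs pres cols).filter (fun p => p.1 == key)).map (fun p => p.2)

theorem pv_find?_eq_of_mem {K V : Type} [BEq K] [LawfulBEq K] (l : List (K × V))
    (hnd : (l.map Prod.fst).Nodup) (p : K × V) (hp : p ∈ l) :
    l.find? (fun q => q.1 == p.1) = some p := by
  induction l with
  | nil => cases hp
  | cons a l ih =>
    simp only [List.map_cons, List.nodup_cons] at hnd
    rcases List.mem_cons.mp hp with rfl | hp'
    · simp [List.find?]
    · have hne : (a.1 == p.1) = false := by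
        simp only [beq_eq_false_iff_ne]
        intro h
        exact hnd.1 (h ▸ (List.mem_map.mpr ⟨p, hp', rfl⟩))
      simp [List.find?, hne, ih hnd.2 hp']

theorem pv_contains_iff {K V : Type} [BEq K] [LawfulBEq K] (d : PySem.Dict K V) (k : K) :
    d.contains k = true ↔ k ∈ d.keys := by
  simp [PySem.Dict.contains, List.any_eq_true, PySem.Dict.keys, List.mem_map]

theorem pv_keys_insert_of_contains {K V : Type} [BEq K] [LawfulBEq K] (d : PySem.Dict K V) (k : K) (v : V)
    (hc : d.contains k = true) : (d.insert k v).keys = d.keys := by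
  simp only [PySem.Dict.insert, hc, if_pos, PySem.Dict.keys, List.map_map]
  apply List.map_congr_left
  intro p _
  by_cases h : p.1 = k <;> simp [h]

theorem pv_keys_insert_of_not_contains {K V : Type} [BEq K] [LawfulBEq K] (d : PySem.Dict K V) (k : K) (v : V)
    (hc : d.contains k = false) : (d.insert k v).keys = d.keys ++ [k] := by
  simp [PySem.Dict.insert, hc, PySem.Dict.keys]

theorem pv_contains_insert_self {K V : Type} [BEq K] [LawfulBEq K] (d : PySem.Dict K V) (k : K) (v : V) :
    (d.insert k v).contains k = true := by
  rw [pv_contains_iff]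
  by_cases hc : d.contains k = true
  · rw [pv_keys_insert_of_contains d k v hc]; exact (pv_contains_iff d k).mp hc
  · rw [pv_keys_insert_of_not_contains d k v (by simpa using hc)]; simp

theorem pv_nodup_keys_insert {K V : Type} [BEq K] [LawfulBEq K] (d : PySem.Dict K V) (k : K) (v : V)
    (hnd : d.keys.Nodup) : (d.insert k v).keys.Nodup := by
  by_cases hc : d.contains k = true
  · rw [pv_keys_insert_of_contains d k v hc]; exact hnd
  · rw [pv_keys_insert_of_not_contains d k v (by simpa using hc)]
    have hk : k ∉ d.keys := fun h => hc ((pv_contains_iff d k).mpr h)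
    exact List.Nodup.append hnd (List.nodup_singleton k)
      (fun a ha hb => hk ((List.mem_singleton.mp hb) ▸ ha))

theorem pv_get?_eq_of_mem {K V : Type} [BEq K] [LawfulBEq K] (d : PySem.Dict K V)
    (hnd : d.keys.Nodup) (p : K × V) (hp : p ∈ d.items) : d.get? p.1 = some p.2 := by
  have hnd' : (d.items.map Prod.fst).Nodup := hnd
  simp only [PySem.Dict.get?]
  rw [pv_find?_eq_of_mem d.items hnd' p hp]
  rfl

theorem pv_getD_mk_map {K V : Type} [BEq K] [LawfulBEq K] (keys : List K) (F : K → V) (k : K)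
    (hk : k ∈ keys) (d0 : V) :
    (PySem.Dict.mk (keys.map (fun k' => (k', F k')))).getD k d0 = F k := by
  simp only [PySem.Dict.getD, PySem.Dict.get?, List.find?_map]
  have h1 : (keys.find? (fun x => x == k)).isSome = true := List.find?_isSome.mpr ⟨k, hk, by simp⟩
  obtain ⟨k2, hk2⟩ := Option.isSome_iff_exists.mp h1
  have hkk : k2 = k := by simpa using List.find?_some hk2
  subst hkk
  have hpred : ((fun q : K × V => q.1 == k2) ∘ (fun x : K => (x, F x))) = (fun x : K => x == k2) := rfl
  rw [hpred, hk2]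
  rfl

theorem pv_insert_getD_self {K V : Type} [BEq K] [LawfulBEq K] (d : PySem.Dict K V) (k : K) (d0 : V)
    (hc : d.contains k = true) (hnd : d.keys.Nodup) : d.insert k (d.getD k d0) = d := by
  apply PySem.Dict.ext
  have : d.insert k (d.getD k d0)
      = PySem.Dict.mk (d.items.map (fun p => if p.1 == k then (k, d.getD k d0) else p)) := by
    rw [PySem.Dict.insert, if_pos hc]
  rw [this]
  show d.items.map (fun p => if p.1 == k then (k, d.getD k d0) else p) = d.items
  conv_rhs => rw [← List.map_id d.items]
  apply List.map_congr_left
  intro p hp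
  by_cases hpk : (p.1 == k) = true
  · have hk1 : p.1 = k := by simpa using hpk
    have hget : d.get? p.1 = some p.2 := pv_get?_eq_of_mem d hnd p hp
    have hgd : d.getD k d0 = p.2 := by
      rw [← hk1]
      simp [PySem.Dict.getD, hget]
    rw [if_pos hpk, hgd, ← hk1]
    simp
  · simp [hpk]

theorem pv_insert_insert_self {K V : Type} [BEq K] [LawfulBEq K] (d : PySem.Dict K V) (k : K) (v w : V) :
    (d.insert k v).insert k w = d.insert k w := by
  apply PySem.Dict.ext
  by_cases hc : d.contains k = true
  · have h1 : d.insert k v = PySem.Dict.mk (d.items.map (fun p => if p.1 == k then (k, v) else p)) := by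
      rw [PySem.Dict.insert, if_pos hc]
    have h2 : d.insert k w = PySem.Dict.mk (d.items.map (fun p => if p.1 == k then (k, w) else p)) := by
      rw [PySem.Dict.insert, if_pos hc]
    have hc1 : (d.insert k v).contains k = true := pv_contains_insert_self d k v
    have h3 : (d.insert k v).insert k w
        = PySem.Dict.mk ((d.insert k v).items.map (fun p => if p.1 == k then (k, w) else p)) := by
      rw [PySem.Dict.insert, if_pos hc1]
    rw [h3, h1, h2]
    show (d.items.map _).map _ = _
    rw [List.map_map]
    apply List.map_congr_left
    intro p _
    by_cases hpk : (p.1 == k) = true <;> simp [hpk]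
  · have hcf : d.contains k = false := by simpa using hc
    have h1 : (d.insert k v).items = d.items ++ [(k, v)] := by simp [PySem.Dict.insert, hcf]
    have hc1 : (d.insert k v).contains k = true := pv_contains_insert_self d k v
    have h3 : (d.insert k v).insert k w
        = PySem.Dict.mk ((d.insert k v).items.map (fun p => if p.1 == k then (k, w) else p)) := by
      rw [PySem.Dict.insert, if_pos hc1]
    have hall : ∀ p ∈ d.items, (p.1 == k) = false := by
      intro p hp
      by_contra hne
      have : (p.1 == k) = true := by simpa using hne
      have : d.contains k = true := by
        simp only [PySem.Dict.contains, List.any_eq_true]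
        exact ⟨p, hp, this⟩
      simp [this] at hcf
    rw [h3, h1]
    have h4 : d.insert k w = PySem.Dict.mk (d.items ++ [(k, w)]) := by
      rw [PySem.Dict.insert, if_neg (by simp [hcf])]
    rw [h4]
    show (d.items ++ [(k, v)]).map _ = d.items ++ [(k, w)]
    rw [List.map_append]
    congr 1
    · conv_rhs => rw [← List.map_id d.items]
      apply List.map_congr_left
      intro p hp
      simp [hall p hp]
    · simp

theorem pv_shape_step {K V : Type} [BEq K] [LawfulBEq K] (d : PySem.Dict K V) (F : K → V)
    (h : d.items = d.keys.map (fun k => (k, F k))) (r : K) :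
    (d.insert r (F r)).items = (d.insert r (F r)).keys.map (fun k => (k, F k))
    ∧ (d.insert r (F r)).keys = PySem.Set.add d.keys r
    ∧ (d.keys.Nodup → (d.insert r (F r)).keys.Nodup) := by
  by_cases hc : d.contains r = true
  · have hd : d.insert r (F r) = d := by
      apply PySem.Dict.ext
      have : d.insert r (F r)
          = PySem.Dict.mk (d.items.map (fun p => if p.1 == r then (r, F r) else p)) := by
        rw [PySem.Dict.insert, if_pos hc]
      rw [this]
      show d.items.map _ = d.items
      rw [h, List.map_map]
      apply List.map_congr_left
      intro k _
      by_cases hkr : k = r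
      · subst hkr; simp
      · simp [Function.comp, hkr]
    have hsc : PySem.Set.contains d.keys r = true := by
      have : r ∈ d.keys := (pv_contains_iff d r).mp hc
      exact List.contains_iff_mem.mpr this
    have hkeys : PySem.Set.add d.keys r = d.keys := by
      rw [show PySem.Set.add d.keys r
          = if PySem.Set.contains d.keys r = true then d.keys else d.keys ++ [r] from rfl, hsc]
      simp
    refine ⟨by rw [hd]; exact h, by rw [hd, hkeys], fun hnd => by rw [hd]; exact hnd⟩
  · have hcf : d.contains r = false := by simpa using hc
    have hitems : (d.insert r (F r)).items = d.items ++ [(r, F r)] := by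
      simp [PySem.Dict.insert, hcf]
    have hkeys : (d.insert r (F r)).keys = d.keys ++ [r] := pv_keys_insert_of_not_contains d r (F r) hcf
    have hsc : PySem.Set.contains d.keys r = false := by
      have hm : ¬ r ∈ d.keys := fun m => hc ((pv_contains_iff d r).mpr m)
      exact Bool.eq_false_iff.mpr (fun hC => hm (List.contains_iff_mem.mp hC))
    have hadd : PySem.Set.add d.keys r = d.keys ++ [r] := by
      rw [show PySem.Set.add d.keys r
          = if PySem.Set.contains d.keys r = true then d.keys else d.keys ++ [r] from rfl, hsc]
      simp
    refine ⟨?_, by rw [hkeys, hadd], ?_⟩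
    · rw [hitems, hkeys]; simp [h]
    · exact fun hnd => pv_nodup_keys_insert d r (F r) hnd

-- folding constant-per-key inserts over any key list from a dict already in keyed shape
theorem pv_foldl_insert_const {K V : Type} [BEq K] [LawfulBEq K] (F : K → V) :
    ∀ (xs : List K) (d : PySem.Dict K V), d.items = d.keys.map (fun k => (k, F k)) →
      xs.foldl (fun d r => d.insert r (F r)) d
        = PySem.Dict.mk ((PySem.Set.update d.keys xs).map (fun k => (k, F k))) := by
  intro xs
  induction xs with
  | nil =>
    intro d h
    apply PySem.Dict.ext
    simpa [PySem.Set.update] using h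
  | cons r xs ih =>
    intro d h
    obtain ⟨h1, h2, _⟩ := pv_shape_step d F h r
    rw [show PySem.Set.update d.keys (r :: xs) = PySem.Set.update (PySem.Set.add d.keys r) xs from rfl]
    rw [List.foldl_cons, ← h2]
    exact ih (d.insert r (F r)) h1

theorem pv_update_append {A : Type} [BEq A] [LawfulBEq A] :
    ∀ (l : List A) (s : List A), l.Nodup → (∀ x ∈ l, PySem.Set.contains s x = false) →
      PySem.Set.update s l = s ++ l := by
  intro l
  induction l with
  | nil => intro s _ _; simp [PySem.Set.update]
  | cons x l ih =>
    intro s hnd hdisj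
    simp only [List.nodup_cons] at hnd
    have hx : PySem.Set.add s x = s ++ [x] := by
      rw [show PySem.Set.add s x
          = if PySem.Set.contains s x = true then s else s ++ [x] from rfl, hdisj x (by simp)]
      simp
    rw [show PySem.Set.update s (x :: l) = PySem.Set.update (PySem.Set.add s x) l from rfl, hx]
    rw [ih (s ++ [x]) hnd.2 ?_]
    · simp
    · intro y hy
      have hys : PySem.Set.contains s y = false := hdisj y (by simp [hy])
      have hyx : (y == x) = false := by
        simp only [beq_eq_false_iff_ne]
        intro hyx; exact hnd.1 (hyx ▸ hy)
      simp [PySem.Set.contains, List.contains_append] at hys ⊢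
      exact ⟨hys, by simpa using hyx⟩

theorem pv_dedup_of_nodup {A : Type} [BEq A] [LawfulBEq A] (l : List A) (hnd : l.Nodup) :
    PySem.List.dedup l = l := by
  have := pv_update_append l [] hnd (by intro x _; rfl)
  simpa [PySem.List.dedup, PySem.Set.ofList, PySem.Set.update, PySem.Set.empty] using this

-- a fold of counter increments over a dict in keyed shape
theorem pv_foldl_modify_count (keys : List String) (hnd : keys.Nodup) :
    ∀ (L : List String) (h : String → Int), (∀ c ∈ L, c ∈ keys) →
      L.foldl (fun d c => d.modify c 0 (· + 1)) (PySem.Dict.mk (keys.map (fun k => (k, h k))))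
        = PySem.Dict.mk (keys.map (fun k => (k, h k + (L.count k : Int)))) := by
  intro L
  induction L with
  | nil => intro h _; simp
  | cons c L ih =>
    intro h hL
    have hck : c ∈ keys := hL c (by simp)
    have hct : (PySem.Dict.mk (keys.map (fun k => (k, h k)))).contains c = true := by
      apply (pv_contains_iff _ _).mpr
      simp only [PySem.Dict.keys, PySem.Dict.items, List.map_map]
      simpa using hck
    have hg : (PySem.Dict.mk (keys.map (fun k => (k, h k)))).getD c 0 = h c :=
      pv_getD_mk_map keys h c hck 0
    have hins : (PySem.Dict.mk (keys.map (fun k => (k, h k)))).insert c (h c + 1)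
        = PySem.Dict.mk (keys.map (fun k => (k, if k = c then h c + 1 else h k))) := by
      apply PySem.Dict.ext
      have : (PySem.Dict.mk (keys.map (fun k => (k, h k)))).insert c (h c + 1)
          = PySem.Dict.mk ((keys.map (fun k => (k, h k))).map
              (fun p => if p.1 == c then (c, h c + 1) else p)) := by
        rw [PySem.Dict.insert, if_pos hct]
      rw [this]
      show (keys.map _).map _ = keys.map _
      rw [List.map_map]
      apply List.map_congr_left
      intro k _
      by_cases hkc : k = c
      · subst hkc; simp
      · simp [Function.comp, hkc]
    have hmod : (PySem.Dict.mk (keys.map (fun k => (k, h k)))).modify c 0 (· + 1)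
        = PySem.Dict.mk (keys.map (fun k => (k, if k = c then h c + 1 else h k))) := by
      show (PySem.Dict.mk (keys.map (fun k => (k, h k)))).insert c
          ((PySem.Dict.mk (keys.map (fun k => (k, h k)))).getD c 0 + 1) = _
      rw [hg, hins]
    rw [List.foldl_cons, hmod, ih (fun k => if k = c then h c + 1 else h k)
      (fun x hx => hL x (by simp [hx]))]
    congr 1
    apply List.map_congr_left
    intro k _
    by_cases hkc : k = c
    · subst hkc
      simp [List.count_cons]
      push_cast
      ring
    · have : (c == k) = false := by simp [beq_eq_false_iff_ne]; exact fun e => hkc e.symm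
      simp [List.count_cons, hkc, this]

-- A's inner loop: a chain of modifies at one key is one insert of the folded inner value
theorem pv_modify_fold (row : String) (v : String → PySem.Dict String Int → PySem.Dict String Int) :
    ∀ (xs : List String) (cm : PySem.Dict String (PySem.Dict String Int)),
      cm.contains row = true → cm.keys.Nodup →
      xs.foldl (fun cm col => cm.modify row PySem.Dict.empty (fun inner => v col inner)) cm
        = cm.insert row (xs.foldl (fun inner col => v col inner) (cm.getD row PySem.Dict.empty)) := by
  intro xs
  induction xs with
  | nil =>
    intro cm hc hnd
    exact (pv_insert_getD_self cm row PySem.Dict.empty hc hnd).symm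
  | cons col xs ih =>
    intro cm hc hnd
    rw [List.foldl_cons]
    have hstep : cm.modify row PySem.Dict.empty (fun inner => v col inner)
        = cm.insert row (v col (cm.getD row PySem.Dict.empty)) := rfl
    rw [hstep, ih _ (pv_contains_insert_self cm row _) (pv_nodup_keys_insert cm row _ hnd),
      PySem.Dict.getD_insert_self, pv_insert_insert_self]
    rfl

theorem pv_A_shape (tids0 : List String) (obs pres : List (String × List (String × String))) :
    ∀ (xs : List String) (cm : PySem.Dict String (PySem.Dict String Int)),
      cm.items = cm.keys.map (fun k => (k, pvRowA tids0 obs pres k)) → cm.keys.Nodup →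
      xs.foldl (fun count_matrix row =>
        tids0.foldl (fun cm2 col =>
          cm2.modify row PySem.Dict.empty (fun inner =>
            inner.insert col (pvCellA obs pres row col)))
          (count_matrix.insert row PySem.Dict.empty)) cm
      = PySem.Dict.mk ((PySem.Set.update cm.keys xs).map (fun k => (k, pvRowA tids0 obs pres k))) := by
  intro xs
  induction xs with
  | nil =>
    intro cm h _
    apply PySem.Dict.ext
    simpa [PySem.Set.update] using h
  | cons r xs ih =>
    intro cm h hnd
    have hstep : tids0.foldl (fun cm2 col =>
          cm2.modify r PySem.Dict.empty (fun inner => inner.insert col (pvCellA obs pres r col)))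
          (cm.insert r PySem.Dict.empty)
        = cm.insert r (pvRowA tids0 obs pres r) := by
      rw [pv_modify_fold r (fun col inner => inner.insert col (pvCellA obs pres r col)) tids0
        (cm.insert r PySem.Dict.empty) (pv_contains_insert_self cm r _)
        (pv_nodup_keys_insert cm r _ hnd), PySem.Dict.getD_insert_self, pv_insert_insert_self]
      rfl
    rw [show PySem.Set.update cm.keys (r :: xs) = PySem.Set.update (PySem.Set.add cm.keys r) xs from rfl]
    rw [List.foldl_cons, hstep]
    obtain ⟨h1, h2, h3⟩ := pv_shape_step cm (pvRowA tids0 obs pres) h r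
    rw [← h2]
    exact ih _ h1 (h3 hnd)

theorem pv_sum_single (cols : List String) (c : String) (n : String → Nat) :
    cols.Nodup → c ∈ cols →
    (cols.map (fun col => if col = c then n col else 0)).sum = n c := by
  induction cols with
  | nil => intro _ h; cases h
  | cons a l ih =>
    intro hnd hc
    simp only [List.nodup_cons] at hnd
    rcases List.mem_cons.mp hc with rfl | hc'
    · simp only [List.map_cons, List.sum_cons]
      have hz : (l.map (fun col => if col = c then n col else 0)).sum = 0 := by
        apply List.sum_eq_zero
        intro x hx
        rcases List.mem_map.mp hx with ⟨col, hcol, rfl⟩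
        have hne : col ≠ c := fun e => hnd.1 (e ▸ hcol)
        simp [hne]
      simp [hz]
    · have hne : a ≠ c := fun e => hnd.1 (e ▸ hc')
      simp only [List.map_cons, List.sum_cons, if_neg hne, zero_add]
      exact ih hnd.2 hc'

theorem pv_sum_ite_eq_countP {A : Type} (p : A → Bool) (xs : List A) :
    (xs.map (fun x => if p x then (1 : Nat) else 0)).sum = xs.countP p := by
  induction xs with
  | nil => simp
  | cons x xs ih =>
    simp only [List.map_cons, List.sum_cons, List.countP_cons, ih]
    cases hx : p x <;> simp [hx] <;> omega

theorem pv_idx_sub (pres : List (String × List (String × String))) (cols : List String)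
    (key : String × String) (c : String) (hc : c ∈ pvIdxD pres cols key) : c ∈ cols := by
  simp only [pvIdxD, pvPairs, List.mem_map, List.mem_filter, List.mem_flatMap] at hc
  obtain ⟨p, ⟨⟨col, hcol, hp⟩, -⟩, rfl⟩ := hc
  obtain ⟨k, -, hpk⟩ := hp
  subst hpk
  exact hcol

-- characterization of A's output
theorem pv_A_char (tids : List String) (obs pres : List (String × List (String × String))) :
    build_coincidence_count_matrix tids obs pres
      = (PySem.List.dedup tids).map (fun r =>
          (r, (PySem.List.dedup tids).map (fun c => (c, pvCellA obs pres r c)))) := by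
  have HA := pv_A_shape tids obs pres tids PySem.Dict.empty rfl List.nodup_nil
  simp only [pvRowA, pvCellA] at HA
  have HG : ∀ r : String,
      tids.foldl (fun inner col => inner.insert col (pvCellA obs pres r col)) PySem.Dict.empty
        = PySem.Dict.mk ((PySem.List.dedup tids).map (fun c => (c, pvCellA obs pres r c))) := by
    intro r
    have t := pv_foldl_insert_const (fun c => pvCellA obs pres r c) tids PySem.Dict.empty rfl
    rw [show PySem.Set.update (PySem.Dict.empty : PySem.Dict String Int).keys tids
        = PySem.List.dedup tids from rfl] at t
    exact t
  simp only [pvCellA] at HG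
  simp only [build_coincidence_count_matrix]
  rw [HA]
  rw [show PySem.Set.update (PySem.Dict.empty : PySem.Dict String (PySem.Dict String Int)).keys tids
      = PySem.List.dedup tids from rfl]
  simp only [HG]
  simp [List.map_map, Function.comp, pvCellA]

-- characterization of B's output
theorem pv_B_char (tids : List String) (obs pres : List (String × List (String × String))) :
    build_coincidence_count_matrix_alt tids obs pres
      = (PySem.List.dedup tids).map (fun r =>
          (r, (PySem.List.dedup tids).map (fun c =>
            (c, (0 : Int) + ((((PySem.Dict.mk obs).getD r []).flatMap
                  (fun key => pvIdxD pres (PySem.List.dedup tids) key)).count c : Int))))) := by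
  have hnd : (PySem.List.dedup tids).Nodup := PySem.List.nodup_dedup tids
  have hdd : PySem.List.dedup (PySem.List.dedup tids) = PySem.List.dedup tids :=
    pv_dedup_of_nodup _ hnd
  simp only [build_coincidence_count_matrix_alt]
  -- 1) the inverted-index fold is a fold over the flattened (key, col) pairs
  have hidx1 : ((PySem.List.dedup tids).foldl (fun index col =>
        (PySem.Set.ofList ((PySem.Dict.mk pres).getD col [])).foldl
          (fun index key => index.modify key [] (fun x => x ++ [col])) index) PySem.Dict.empty)
      = (pvPairs pres (PySem.List.dedup tids)).foldl
          (fun d p => d.modify p.1 [] (fun x => x ++ [p.2])) PySem.Dict.empty := by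
    simp only [pvPairs]
    rw [List.foldl_flatMap]
    simp only [List.foldl_map]
  rw [hidx1]
  -- 2) lookups in the index
  have hidx2 : ∀ key : String × String,
      ((pvPairs pres (PySem.List.dedup tids)).foldl
        (fun d p => d.modify p.1 [] (fun x => x ++ [p.2])) PySem.Dict.empty).getD key []
      = pvIdxD pres (PySem.List.dedup tids) key := by
    intro key
    rw [PySem.Dict.getD_foldl_modify_append]
    simp [pvIdxD, PySem.Dict.getD, PySem.Dict.get?, PySem.Dict.empty]
  simp only [hidx2]
  -- 3) the zero-counter dict
  have hupd : PySem.Set.update (PySem.Dict.empty : PySem.Dict String Int).keys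
      (PySem.List.dedup tids) = PySem.List.dedup tids := by
    rw [show PySem.Set.update (PySem.Dict.empty : PySem.Dict String Int).keys (PySem.List.dedup tids)
        = PySem.List.dedup (PySem.List.dedup tids) from rfl]
    exact hdd
  have hc0 : (PySem.List.dedup tids).foldl (fun counts col => counts.insert col (0 : Int))
        PySem.Dict.empty
      = PySem.Dict.mk ((PySem.List.dedup tids).map (fun k => (k, (0 : Int)))) := by
    have t := pv_foldl_insert_const (fun _ : String => (0 : Int)) (PySem.List.dedup tids)
      PySem.Dict.empty rfl
    rw [hupd] at t
    exact t
  rw [hc0]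
  -- 4) the matrix fold
  have hupd2 : PySem.Set.update (PySem.Dict.empty : PySem.Dict String (PySem.Dict String Int)).keys
      (PySem.List.dedup tids) = PySem.List.dedup tids := by
    rw [show PySem.Set.update
        (PySem.Dict.empty : PySem.Dict String (PySem.Dict String Int)).keys (PySem.List.dedup tids)
        = PySem.List.dedup (PySem.List.dedup tids) from rfl]
    exact hdd
  have hmat := pv_foldl_insert_const
    (fun r => ((PySem.Dict.mk obs).getD r []).foldl
      (fun counts key => (pvIdxD pres (PySem.List.dedup tids) key).foldl
        (fun counts col => counts.modify col 0 (· + 1)) counts)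
      (PySem.Dict.mk ((PySem.List.dedup tids).map (fun k => (k, (0 : Int))))))
    (PySem.List.dedup tids) PySem.Dict.empty rfl
  rw [hupd2] at hmat
  have hflat : ∀ r : String, ((PySem.Dict.mk obs).getD r []).foldl
      (fun counts key => (pvIdxD pres (PySem.List.dedup tids) key).foldl
        (fun counts col => counts.modify col 0 (· + 1)) counts)
      (PySem.Dict.mk ((PySem.List.dedup tids).map (fun k => (k, (0 : Int)))))
      = PySem.Dict.mk ((PySem.List.dedup tids).map (fun k =>
          (k, (0 : Int) + ((((PySem.Dict.mk obs).getD r []).flatMap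
            (fun key => pvIdxD pres (PySem.List.dedup tids) key)).count k : Int)))) := by
    intro r
    have hsub : ∀ c ∈ ((PySem.Dict.mk obs).getD r []).flatMap
        (fun key => pvIdxD pres (PySem.List.dedup tids) key), c ∈ PySem.List.dedup tids := by
      intro c hcm
      rcases List.mem_flatMap.mp hcm with ⟨key, _, hk⟩
      exact pv_idx_sub pres (PySem.List.dedup tids) key c hk
    have hcnt := pv_foldl_modify_count (PySem.List.dedup tids) hnd
      (((PySem.Dict.mk obs).getD r []).flatMap (fun key => pvIdxD pres (PySem.List.dedup tids) key))
      (fun _ => (0 : Int)) hsub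
    rw [← List.foldl_flatMap]
    exact hcnt
  rw [hmat]
  simp only [hflat]
  simp [List.map_map, Function.comp]

-- count of column c in one index entry: 1 if the key sits in c's presence set, else 0
theorem pv_idx_count (pres : List (String × List (String × String))) (cols : List String)
    (hnd : cols.Nodup) (key : String × String) (c : String) (hc : c ∈ cols) :
    (pvIdxD pres cols key).countP (fun x => x == c)
      = if PySem.Set.contains ((PySem.Dict.mk pres).getD c []) key then (1 : Nat) else 0 := by
  simp only [pvIdxD, List.countP_map, List.countP_filter, pvPairs, List.countP_flatMap,
    Function.comp]
  rw [List.map_congr_left (g := fun col => if col = c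
      then List.countP (fun k => k == key) (PySem.Set.ofList ((PySem.Dict.mk pres).getD col [])) else 0) ?_]
  · rw [pv_sum_single cols c _ hnd hc]
    have hcc : List.countP (fun k => k == key) (PySem.Set.ofList ((PySem.Dict.mk pres).getD c []))
        = (PySem.Set.ofList ((PySem.Dict.mk pres).getD c [])).count key := rfl
    rw [hcc]
    have hmm : key ∈ PySem.Set.ofList ((PySem.Dict.mk pres).getD c [])
        ↔ key ∈ ((PySem.Dict.mk pres).getD c []) :=
      PySem.Set.mem_ofList ((PySem.Dict.mk pres).getD c []) key
    by_cases hm : key ∈ ((PySem.Dict.mk pres).getD c [])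
    · rw [List.count_eq_one_of_mem
          (PySem.Set.nodup_ofList ((PySem.Dict.mk pres).getD c [])) (hmm.mpr hm),
        if_pos (show PySem.Set.contains ((PySem.Dict.mk pres).getD c []) key = true from
          List.contains_iff_mem.mpr hm)]
    · rw [List.count_eq_zero_of_not_mem (fun h => hm (hmm.mp h)),
        if_neg (show ¬ PySem.Set.contains ((PySem.Dict.mk pres).getD c []) key = true from
          fun h => hm (List.contains_iff_mem.mp h))]
  · intro col _
    by_cases hcol : col = c
    · subst hcol
      simp only [Function.comp_apply, if_true, List.countP_map]
      apply List.countP_congr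
      intro x _
      simp [Function.comp]
    · have hf : (col == c) = false := beq_eq_false_iff_ne.mpr hcol
      simp [hf, hcol, Function.comp, List.countP_false]

-- every cell agrees: A's membership count equals B's inverted-index count
theorem pv_cell_eq (obs pres : List (String × List (String × String)))
    (cols : List String) (hnd : cols.Nodup)
    (r c : String) (hc : c ∈ cols) :
    pvCellA obs pres r c
      = (0 : Int) + ((((PySem.Dict.mk obs).getD r []).flatMap
          (fun key => pvIdxD pres cols key)).count c : Int) := by
  -- Nat-level: count of c in the flattened index = count of observation keys present in column c
  have h1 : ((((PySem.Dict.mk obs).getD r []).flatMap (fun key => pvIdxD pres cols key)).count c)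
      = (((PySem.Dict.mk obs).getD r []).map (fun key =>
          if PySem.Set.contains ((PySem.Dict.mk pres).getD c []) key then (1 : Nat) else 0)).sum := by
    simp only [List.count, List.countP_flatMap]
    refine congrArg List.sum (List.map_congr_left ?_)
    intro key _
    simp only [Function.comp]
    exact pv_idx_count pres cols hnd key c hc
  have h2 : pvCellA obs pres r c
      = ((((PySem.Dict.mk obs).getD r []).countP
          (fun key => PySem.Set.contains ((PySem.Dict.mk pres).getD c []) key) : Nat) : Int) := by
    simp only [pvCellA]
    exact PySem.List.sum_map_ite_one_zero _ _
  rw [zero_add, h2, h1, pv_sum_ite_eq_countP]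

-- ===== VERDICT (by name: the statement is the Claim_ definition above) =====
theorem build_coincidence_count_matrix_spec : Claim_equal_build_coincidence_count_matrix := by
  intro tids obs pres _hdom
  unfold Spec_build_coincidence_count_matrix
  rw [pv_A_char, pv_B_char]
  apply List.map_congr_left
  intro r _
  show (r, _) = (r, _)
  congr 1
  apply List.map_congr_left
  intro c hc
  show (c, _) = (c, _)
  congr 1
  exact pv_cell_eq obs pres (PySem.List.dedup tids) (PySem.List.nodup_dedup tids) r c hc
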